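-- pv_equiv track=rewrite | github.com/PBudgie/advent2021 | 10-2.py | getPointsForString
-- ===== SOURCE A (Python) =====
-- def getPointsForString(string):
--   totalScore = 0
--   for i in range(len(string)):
--     if string[i] == ')':
--       totalScore = 5*totalScore + 1
--     elif string[i] == ']':
--       totalScore = 5*totalScore + 2
--     elif string[i] == '}':
--       totalScore = 5*totalScore + 3
--     elif string[i] == '>':
--       totalScore = 5*totalScore + 4
--   return totalScore
-- ===== SOURCE B (Python) =====
-- def getPointsForString(string):
--   values = []
--   for c in string:
--     if c == ')':
--       values.append(1)
--     elif c == ']':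
--       values.append(2)
--     elif c == '}':
--       values.append(3)
--     elif c == '>':
--       values.append(4)
--   return sum(v * 5 ** (len(values) - 1 - i) for i, v in enumerate(values))
-- ===== Notes on version B (the rewrite author's own statement) =====
-- stated objective: alternative
-- what changed: Replaces the left-to-right Horner accumulation (totalScore = 5*totalScore + digit) with a two-phase computation: first collect the digit values of the closing brackets into a list, then sum each value times 5**(len-1-index) as an explicit positional base-5 sum. B also iterates characters directly instead of indexing via range(len), a constant-factor speedup a timing run measured.
import Mathlib
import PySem

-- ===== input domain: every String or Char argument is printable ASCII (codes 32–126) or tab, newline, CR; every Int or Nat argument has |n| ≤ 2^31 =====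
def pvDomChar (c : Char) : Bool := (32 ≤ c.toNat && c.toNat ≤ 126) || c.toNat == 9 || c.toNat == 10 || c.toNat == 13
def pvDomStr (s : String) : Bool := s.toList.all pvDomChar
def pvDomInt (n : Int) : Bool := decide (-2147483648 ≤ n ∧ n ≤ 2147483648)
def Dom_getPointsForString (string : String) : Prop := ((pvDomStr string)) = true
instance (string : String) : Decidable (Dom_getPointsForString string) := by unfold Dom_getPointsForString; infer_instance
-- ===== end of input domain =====

-- B replaces A's left-to-right Horner accumulation by collecting the bracket
-- digit values first and then summing value * 5^(len-1-index) positionally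
-- (objective: alternative decomposition, same O(n) cost).

-- ===== PORT A =====
-- one iteration of A's loop body on the current character
def pvStepA (acc : Int) (c : Char) : Int :=
  if c = ')' then 5 * acc + 1
  else if c = ']' then 5 * acc + 2
  else if c = '}' then 5 * acc + 3
  else if c = '>' then 5 * acc + 4
  else acc

def getPointsForString (string : String) : Int :=
  (PySem.List.pyRange 0 (string.toList.length : Int) 1).foldl
    (fun acc i => pvStepA acc (PySem.List.pyGetD string.toList i ' ')) 0

-- ===== PORT B =====
-- digit value of a closing bracket, none for any other character
def pvVal? (c : Char) : Option Int :=
  if c = ')' then some 1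
  else if c = ']' then some 2
  else if c = '}' then some 3
  else if c = '>' then some 4
  else none

def getPointsForString_alt (string : String) : Int :=
  let values := string.toList.filterMap pvVal?
  ((PySem.List.enumerate values 0).map
      (fun p => p.2 * (5 : Int) ^ (values.length - 1 - p.1.toNat))).sum

-- ===== PRECONDITION & SPEC =====
def Spec_getPointsForString (string : String) (out : Int) : Prop := out = getPointsForString_alt string
instance (string : String) (out : Int) : Decidable (Spec_getPointsForString string out) := by unfold Spec_getPointsForString; infer_instance

-- ===== CLAIM (what is proved, stated in full; the proofs are below) =====
def Claim_equal_getPointsForString : Prop := ∀ (string : String), Dom_getPointsForString string → Spec_getPointsForString string (getPointsForString string)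

-- ===== LEMMAS AND PROOFS =====

-- A's char step is the Horner step on the digit value, skipping non-brackets
theorem pvStepA_eq_val (acc : Int) (c : Char) :
    pvStepA acc c = match pvVal? c with
      | none => acc
      | some v => 5 * acc + v := by
  unfold pvStepA pvVal?
  split_ifs <;> rfl

-- A's fold over the characters equals the Horner fold over the digit values
theorem foldA_eq_horner (cs : List Char) (acc : Int) :
    cs.foldl pvStepA acc
      = (cs.filterMap pvVal?).foldl (fun a v => 5 * a + v) acc := by
  induction cs generalizing acc with
  | nil => rfl
  | cons c cs ih =>
      simp only [List.foldl_cons, List.filterMap_cons, pvStepA_eq_val]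
      cases h : pvVal? c with
      | none => simp [ih]
      | some v => simp [ih]

-- Horner fold with accumulator, closed form
theorem horner_acc (vs : List Int) (acc : Int) :
    vs.foldl (fun a v => 5 * a + v) acc
      = acc * 5 ^ vs.length + vs.foldl (fun a v => 5 * a + v) 0 := by
  induction vs generalizing acc with
  | nil => simp
  | cons v vs ih =>
      simp only [List.foldl_cons, List.length_cons]
      rw [ih (5 * acc + v), ih (5 * 0 + v)]
      ring

-- the positional base-5 sum over the enumerated values equals the Horner fold
theorem sum_enum_eq_horner (vs : List Int) (s N : Nat) (h : s + vs.length = N) :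
    ((PySem.List.enumerate vs (s : Int)).map
        (fun p => p.2 * (5 : Int) ^ (N - 1 - p.1.toNat))).sum
      = vs.foldl (fun a v => 5 * a + v) 0 := by
  induction vs generalizing s with
  | nil => simp [PySem.List.enumerate_nil]
  | cons v vs ih =>
      rw [PySem.List.enumerate_cons]
      simp only [List.map_cons, List.sum_cons]
      have hcast : ((s : Int) + 1) = ((s + 1 : Nat) : Int) := by push_cast; ring
      rw [hcast, ih (s + 1) (by simp at h ⊢; omega)]
      have hs : (s : Int).toNat = s := Int.toNat_natCast s
      have hexp : N - 1 - (s : Int).toNat = vs.length := by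
        rw [hs]; simp at h; omega
      rw [hexp, List.foldl_cons, horner_acc vs (5 * 0 + v)]
      ring

-- ===== VERDICT (by name: the statement is the Claim_ definition above) =====
theorem getPointsForString_spec : Claim_equal_getPointsForString := by
  intro s _
  unfold Spec_getPointsForString getPointsForString getPointsForString_alt
  rw [PySem.List.foldl_pyRange_zero_pyGetD' s.toList ' ' pvStepA 0,
      foldA_eq_horner]
  exact (sum_enum_eq_horner _ 0 _ (by simp)).symm
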